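-- pv_equiv track=rewrite | github.com/merialdo/research.raf | utils/bdsa_utils.py | find_contained
-- ===== SOURCE A (Python) =====
-- import collections
-- import itertools
--
-- def find_contained(id2set:dict):
--     """
--     Given a set of sets (identified), find all sets that are completely contained in another set
--     :param sets:
--     :return:
--     >>> find_contained({'a':{1,2,3}, 'b':{3,2}, 'c': {1,5},'d':{1}, 'e':{1,5}})
--     ['b', 'c', 'd']
--     >>> elems = {x: set(range(x)) for x in range(10)}
--     >>> find_contained(elems)
--     [0, 1, 2, 3, 4, 5, 6, 7, 8]
--     """
--     all_elements = set()
--     all_setids = id2set.keys()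
--     all_setids_sorted = sorted(all_setids, key=lambda x: len(id2set[x]))
--     candidate_pairs = set(tuple(x) for x in itertools.combinations(all_setids_sorted, 2))
--     element2setids = collections.defaultdict(set)
--     for pid, aset in id2set.items():
--         all_elements.update(aset)
--         for elem in aset:
--             element2setids[elem].add(pid)
--     all_grouped_setids = set(frozenset(s) for s in element2setids.values())
--     # For a given element, a present set id cannot be a subset of a missing set id
--     for setids in all_grouped_setids:
--         missing_setids = all_setids - setids
--         pairs_to_remove = set(tuple(x) for x in itertools.
--                               product(setids, missing_setids))
--         candidate_pairs.difference_update(pairs_to_remove)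
--     return sorted(set(x[0] for x in candidate_pairs))
-- ===== SOURCE B (Python) =====
-- import collections
--
-- def find_contained(id2set: dict):
--     # Postings-list algorithm: intersect per-element id sets to get each set's
--     # supersets directly, instead of filtering all O(n^2) candidate pairs.
--     order = sorted(id2set, key=lambda x: len(id2set[x]))
--     rank = {k: i for i, k in enumerate(order)}
--     elem2ids = collections.defaultdict(set)
--     for pid, aset in id2set.items():
--         for e in aset:
--             elem2ids[e].add(pid)
--     result = []
--     for x in id2set:
--         s = id2set[x]
--         if s:
--             it = iter(s)
--             supers = set(elem2ids[next(it)])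
--             for e in it:
--                 supers &= elem2ids[e]
--         else:
--             supers = set(order)
--         rx = rank[x]
--         if any(rank[y] > rx for y in supers):
--             result.append(x)
--     return sorted(result)
-- ===== Notes on version B (the rewrite author's own statement) =====
-- stated objective: faster
-- what changed: Instead of materialising all O(n^2) candidate id pairs and pruning them against every element-group (A), B intersects per-element posting lists to get each set's supersets directly and checks for a superset ranked later in the size-sorted order.
import Mathlib
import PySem

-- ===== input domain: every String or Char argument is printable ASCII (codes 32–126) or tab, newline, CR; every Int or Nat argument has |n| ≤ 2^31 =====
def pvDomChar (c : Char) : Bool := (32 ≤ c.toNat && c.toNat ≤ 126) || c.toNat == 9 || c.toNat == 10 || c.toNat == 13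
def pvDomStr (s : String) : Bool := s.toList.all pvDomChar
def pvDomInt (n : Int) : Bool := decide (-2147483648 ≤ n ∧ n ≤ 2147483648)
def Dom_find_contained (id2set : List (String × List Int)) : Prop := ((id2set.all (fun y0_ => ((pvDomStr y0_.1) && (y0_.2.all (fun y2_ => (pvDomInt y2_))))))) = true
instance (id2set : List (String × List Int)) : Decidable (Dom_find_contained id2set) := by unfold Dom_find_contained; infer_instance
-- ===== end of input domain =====

-- B replaces A's O(n^2) candidate-pair set, pruned against every element group, by
-- intersecting per-element posting lists (measured asymptotically faster in a timing run).

-- Input decoding shared by both ports (the type convention's reading of the Python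
-- argument `dict[str, set[int]]`): a Python dict built from the pairs in order
-- (later duplicate key overwrites in place), each value read as a set.
def pvDict (id2set : List (String × List Int)) : PySem.Dict String (List Int) :=
  id2set.foldl (fun d p => d.insert p.1 (PySem.Set.ofList p.2)) PySem.Dict.empty

-- ===== PORT A =====
-- Faithful transliteration of A. Python set/frozenset values are PySem.Set lists; a
-- frozenset is modelled canonically as the sorted list of its elements (frozenset
-- equality = set equality); every place A iterates a Python set (the grouped-setids
-- loop, the final `set(x[0] …)`) only feeds order-insensitive consumers
-- (set difference accumulation, a final sort), so list order is not observable.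
def find_contained (id2set : List (String × List Int)) : List String :=
  let d := pvDict id2set
  let all_setids := d.keys
  let all_setids_sorted := PySem.List.sorted all_setids (fun x => (d.getD x []).length)
  -- candidate_pairs = set(tuple(x) for x in itertools.combinations(all_setids_sorted, 2))
  let candidate_pairs : PySem.Set (String × String) :=
    PySem.Set.ofList ((PySem.List.combinations all_setids_sorted 2).map
      (fun c => (c.headD "", (c.drop 1).headD "")))
  -- the items loop: all_elements (never read afterwards) and element2setids
  let st := d.items.foldl (fun st pr =>
      (PySem.Set.update st.1 pr.2,
       pr.2.foldl (fun acc elem => acc.modify elem [] (fun s => PySem.Set.add s pr.1)) st.2))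
    ((PySem.Set.empty : PySem.Set Int), (PySem.Dict.empty : PySem.Dict Int (PySem.Set String)))
  let element2setids := st.2
  let all_grouped_setids : PySem.Set (List String) :=
    PySem.Set.ofList (element2setids.values.map (fun s => PySem.List.sorted s (fun y => y)))
  let final := all_grouped_setids.foldl (fun cand setids =>
      let missing_setids := PySem.Set.diff (PySem.Set.ofList all_setids) setids
      let pairs_to_remove : PySem.Set (String × String) :=
        PySem.Set.ofList (setids.flatMap (fun s => missing_setids.map (fun m => (s, m))))
      PySem.Set.diff cand pairs_to_remove) candidate_pairs
  PySem.List.sorted (PySem.Set.ofList (final.map (fun p => p.1))) (fun y => y)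

-- ===== PORT B =====
-- Transliteration of Source B: size-sorted rank per id, posting lists per element,
-- supersets of x = intersection of the posting lists of x's elements (all ids when x
-- is empty); x is reported when some superset has a larger rank. The `iter/next`
-- walk over the Python set value is the [] / e :: rest case split below; the
-- intersection and the `any` consume sets order-insensitively.
def find_contained_alt (id2set : List (String × List Int)) : List String :=
  let d := pvDict id2set
  let order := PySem.List.sorted d.keys (fun x => (d.getD x []).length)
  let rank : PySem.Dict String Int :=
    (PySem.List.enumerate order).foldl (fun r p => r.insert p.2 p.1) PySem.Dict.empty
  let elem2ids : PySem.Dict Int (PySem.Set String) :=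
    d.items.foldl (fun acc pr =>
      pr.2.foldl (fun acc e => acc.modify e [] (fun s => PySem.Set.add s pr.1)) acc)
      PySem.Dict.empty
  let result := d.keys.foldl (fun res x =>
      let s := d.getD x []
      let supers : PySem.Set String :=
        match s with
        | [] => PySem.Set.ofList order
        | e :: rest =>
            rest.foldl (fun sup e' => PySem.Set.inter sup (elem2ids.getD e' []))
              (PySem.Set.ofList (elem2ids.getD e []))
      let rx := rank.getD x 0
      if supers.any (fun y => rx < rank.getD y 0) then res ++ [x] else res) []
  PySem.List.sorted result (fun y => y)

-- ===== PRECONDITION & SPEC =====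
def Spec_find_contained (id2set : List (String × List Int)) (out : List String) : Prop := out = find_contained_alt id2set
instance (id2set : List (String × List Int)) (out : List String) : Decidable (Spec_find_contained id2set out) := by unfold Spec_find_contained; infer_instance

-- ===== CLAIM (what is proved, stated in full; the proofs are below) =====
def Claim_equal_find_contained : Prop := ∀ (id2set : List (String × List Int)), Dom_find_contained id2set → Spec_find_contained id2set (find_contained id2set)


-- ===== LEMMAS AND PROOFS =====

-- proof-only shorthands for the pieces the ports build
def pvG (d : PySem.Dict String (List Int)) : PySem.Dict Int (PySem.Set String) :=
  d.items.foldl (fun acc pr =>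
    pr.2.foldl (fun acc e => acc.modify e [] (fun s => PySem.Set.add s pr.1)) acc) PySem.Dict.empty

def pvOrder (d : PySem.Dict String (List Int)) : List String :=
  PySem.List.sorted d.keys (fun x => (d.getD x []).length)

def pvRank (d : PySem.Dict String (List Int)) : PySem.Dict String Int :=
  (PySem.List.enumerate (pvOrder d)).foldl (fun r p => r.insert p.2 p.1) PySem.Dict.empty

def pvSupers (d : PySem.Dict String (List Int)) (x : String) : PySem.Set String :=
  match d.getD x [] with
  | [] => PySem.Set.ofList (pvOrder d)
  | e :: rest =>
      rest.foldl (fun sup e' => PySem.Set.inter sup ((pvG d).getD e' []))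
        (PySem.Set.ofList ((pvG d).getD e []))

def pvP (d : PySem.Dict String (List Int)) (x : String) : Bool :=
  (pvSupers d x).any (fun y => (pvRank d).getD x 0 < (pvRank d).getD y 0)

def pvFinal (d : PySem.Dict String (List Int)) : PySem.Set (String × String) :=
  (PySem.Set.ofList ((pvG d).values.map (fun s => PySem.List.sorted s (fun y => y)))).foldl
    (fun cand setids =>
      PySem.Set.diff cand (PySem.Set.ofList (setids.flatMap
        (fun s => (PySem.Set.diff (PySem.Set.ofList d.keys) setids).map (fun m => (s, m))))))
    (PySem.Set.ofList ((PySem.List.combinations (pvOrder d) 2).map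
      (fun c => (c.headD "", (c.drop 1).headD ""))))

theorem pvDict_keys_nodup (l : List (String × List Int)) : (pvDict l).keys.Nodup :=
  PySem.Dict.nodup_keys_foldl_insert_key (ν := List Int) l (fun p => p.1)
    (fun _ p => PySem.Set.ofList p.2) PySem.Dict.empty List.nodup_nil

theorem mem_groupInner (aset : List Int) (acc : PySem.Dict Int (PySem.Set String))
    (pid : String) (q : String) (e : Int) :
    q ∈ ((aset.foldl (fun acc e => acc.modify e [] (fun s => PySem.Set.add s pid)) acc).getD e []) ↔
      q ∈ acc.getD e [] ∨ (q = pid ∧ e ∈ aset) := by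
  induction aset generalizing acc with
  | nil => simp
  | cons a t ih =>
    simp only [List.foldl_cons, ih]
    rw [PySem.Dict.getD_modify]
    by_cases he : e = a
    · subst he
      rw [if_pos rfl]
      simp only [PySem.Set.mem_add, List.mem_cons]
      tauto
    · rw [if_neg he]
      simp only [List.mem_cons]
      tauto

theorem mem_groupOuter (items : List (String × List Int)) (acc : PySem.Dict Int (PySem.Set String))
    (q : String) (e : Int) :
    q ∈ ((items.foldl (fun acc pr =>
          pr.2.foldl (fun acc el => acc.modify el [] (fun s => PySem.Set.add s pr.1)) acc) acc).getD e []) ↔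
      q ∈ acc.getD e [] ∨ ∃ pr ∈ items, q = pr.1 ∧ e ∈ pr.2 := by
  induction items generalizing acc with
  | nil => simp
  | cons p t ih =>
    simp only [List.foldl_cons, ih, mem_groupInner, List.mem_cons]
    aesop

theorem mem_pvG (d : PySem.Dict String (List Int)) (hk : d.keys.Nodup) (q : String) (e : Int) :
    q ∈ (pvG d).getD e [] ↔ q ∈ d.keys ∧ e ∈ d.getD q [] := by
  unfold pvG
  rw [mem_groupOuter, PySem.Dict.items_eq_map_keys d hk [], PySem.Dict.getD_empty]
  simp only [List.not_mem_nil, false_or, List.mem_map]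
  constructor
  · rintro ⟨pr, ⟨k, hkm, rfl⟩, rfl, h2⟩
    exact ⟨hkm, h2⟩
  · rintro ⟨h1, h2⟩
    exact ⟨(q, d.getD q []), ⟨q, h1, rfl⟩, rfl, h2⟩


theorem mem_keys_groupOuter (items : List (String × List Int)) (acc : PySem.Dict Int (PySem.Set String))
    (e : Int) :
    e ∈ (items.foldl (fun acc pr =>
          pr.2.foldl (fun acc el => acc.modify el [] (fun s => PySem.Set.add s pr.1)) acc) acc).keys ↔
      e ∈ acc.keys ∨ ∃ pr ∈ items, e ∈ pr.2 := by
  induction items generalizing acc with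
  | nil => simp
  | cons p t ih =>
    simp only [List.foldl_cons, ih, PySem.Dict.keys_foldl_modify, PySem.Set.mem_update, List.mem_cons]
    constructor
    · rintro ((h | h) | ⟨pr, hpr, h⟩)
      · exact Or.inl h
      · exact Or.inr ⟨p, Or.inl rfl, h⟩
      · exact Or.inr ⟨pr, Or.inr hpr, h⟩
    · rintro (h | ⟨pr, (rfl | hpr), h⟩)
      · exact Or.inl (Or.inl h)
      · exact Or.inl (Or.inr h)
      · exact Or.inr ⟨pr, hpr, h⟩

theorem nodup_keys_pvG (d : PySem.Dict String (List Int)) : (pvG d).keys.Nodup := by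
  unfold pvG
  have h0 : (PySem.Dict.empty : PySem.Dict Int (PySem.Set String)).keys.Nodup := List.nodup_nil
  generalize (PySem.Dict.empty : PySem.Dict Int (PySem.Set String)) = acc at h0 ⊢
  induction d.items generalizing acc with
  | nil => exact h0
  | cons p t ih =>
    simp only [List.foldl_cons]
    exact ih _ (PySem.Dict.nodup_keys_foldl_modify_key p.2 (fun x => x) []
      (fun _ _ s => PySem.Set.add s p.1) acc h0)

theorem mem_keys_pvG (d : PySem.Dict String (List Int)) (hk : d.keys.Nodup) (e : Int) :
    e ∈ (pvG d).keys ↔ ∃ q ∈ d.keys, e ∈ d.getD q [] := by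
  unfold pvG
  rw [mem_keys_groupOuter, PySem.Dict.items_eq_map_keys d hk []]
  simp

theorem mem_foldl_diff {α β : Type} [BEq α] [LawfulBEq α] (gs : List β) (rem : β → List α)
    (s0 : PySem.Set α) (p : α) :
    p ∈ gs.foldl (fun c g => PySem.Set.diff c (rem g)) s0 ↔ p ∈ s0 ∧ ∀ g ∈ gs, p ∉ rem g := by
  induction gs generalizing s0 with
  | nil => simp
  | cons g t ih =>
    simp only [List.foldl_cons, ih, PySem.Set.mem_diff, List.mem_cons]
    constructor
    · rintro ⟨⟨h1, h2⟩, h3⟩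
      exact ⟨h1, by rintro g' (rfl | hg'); exacts [h2, h3 g' hg']⟩
    · rintro ⟨h1, h2⟩
      exact ⟨⟨h1, h2 g (Or.inl rfl)⟩, fun g' hg' => h2 g' (Or.inr hg')⟩

theorem mem_foldl_inter {α : Type} [BEq α] [LawfulBEq α] (es : List Int) (G : Int → PySem.Set α)
    (init : PySem.Set α) (y : α) :
    y ∈ es.foldl (fun sup e => PySem.Set.inter sup (G e)) init ↔ y ∈ init ∧ ∀ e ∈ es, y ∈ G e := by
  induction es generalizing init with
  | nil => simp
  | cons e t ih =>
    simp only [List.foldl_cons, ih, PySem.Set.mem_inter, List.mem_cons]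
    constructor
    · rintro ⟨⟨h1, h2⟩, h3⟩
      exact ⟨h1, by rintro e' (rfl | he'); exacts [h2, h3 e' he']⟩
    · rintro ⟨h1, h2⟩
      exact ⟨⟨h1, h2 e (Or.inl rfl)⟩, fun e' he' => h2 e' (Or.inr he')⟩

theorem mem_cand (ord : List String) (x y : String) :
    (x, y) ∈ PySem.Set.ofList ((PySem.List.combinations ord 2).map
        (fun c => (c.headD "", (c.drop 1).headD ""))) ↔ [x, y].Sublist ord := by
  rw [PySem.Set.mem_ofList, List.mem_map]
  constructor
  · rintro ⟨c, hc, hpair⟩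
    obtain ⟨hsub, hlen⟩ := (PySem.List.mem_combinations_iff ord 2 c).mp hc
    rcases c with _ | ⟨a, _ | ⟨b, _ | _⟩⟩ <;> simp_all
  · intro h
    exact ⟨[x, y], (PySem.List.mem_combinations_iff ord 2 [x, y]).mpr ⟨h, rfl⟩, rfl⟩

theorem getD_rankfold_not_mem (l : List (Int × String)) (r : PySem.Dict String Int) (y : String)
    (h : ∀ p ∈ l, p.2 ≠ y) :
    (l.foldl (fun r p => r.insert p.2 p.1) r).getD y 0 = r.getD y 0 := by
  induction l generalizing r with
  | nil => rfl
  | cons p t ih =>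
    simp only [List.foldl_cons]
    rw [ih _ (fun q hq => h q (List.mem_cons_of_mem _ hq)), PySem.Dict.getD_insert,
      if_neg (fun hEq => h p (List.mem_cons_self) hEq.symm)]

theorem rank_getD (ord : List String) (hnd : ord.Nodup) (s : Int) (r0 : PySem.Dict String Int)
    (y : String) (hy : y ∈ ord) :
    ((PySem.List.enumerate ord s).foldl (fun r p => r.insert p.2 p.1) r0).getD y 0 =
      s + (ord.idxOf y : Int) := by
  induction ord generalizing s r0 with
  | nil => cases hy
  | cons k t ih =>
    obtain ⟨hkt, hnd'⟩ := List.nodup_cons.mp hnd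
    rw [PySem.List.enumerate_cons]
    simp only [List.foldl_cons]
    rcases List.mem_cons.mp hy with rfl | hyt
    · have hnotin : ∀ p ∈ PySem.List.enumerate t (s + 1), p.2 ≠ y := by
        intro p hp
        rcases (PySem.List.mem_enumerate_iff t (s + 1) p).mp hp with ⟨i, hi, rfl⟩
        exact fun h => hkt (h ▸ List.getElem_mem hi)
      rw [getD_rankfold_not_mem _ _ _ hnotin, PySem.Dict.getD_insert, if_pos rfl]
      simp
    · rw [ih hnd' (s + 1) (r0.insert k s) hyt]
      have hky : (k == y) = false := beq_eq_false_iff_ne.mpr (fun h => hkt (h ▸ hyt))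
      rw [List.idxOf_cons, hky]
      simp only [cond_false]
      push_cast
      ring

theorem survival (d : PySem.Dict String (List Int)) (hk : d.keys.Nodup) (x y : String)
    (hx : x ∈ d.keys) (hy : y ∈ d.keys) :
    (∀ g ∈ PySem.Set.ofList ((pvG d).values.map (fun s => PySem.List.sorted s (fun y => y))),
        (x, y) ∉ PySem.Set.ofList (g.flatMap
          (fun s => (PySem.Set.diff (PySem.Set.ofList d.keys) g).map (fun m => (s, m))))) ↔
      ∀ e ∈ d.getD x [], e ∈ d.getD y [] := by
  have hvals : ∀ v, v ∈ (pvG d).values ↔ ∃ e ∈ (pvG d).keys, v = (pvG d).getD e [] := by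
    intro v
    rw [PySem.Dict.values_eq_map_keys (pvG d) (nodup_keys_pvG d) []]
    simp only [List.mem_map]
    exact ⟨fun ⟨e, he, h⟩ => ⟨e, he, h.symm⟩, fun ⟨e, he, h⟩ => ⟨e, he, h.symm⟩⟩
  rw [PySem.Set.ofList_eq_self_of_nodup d.keys hk]
  constructor
  · intro h e he
    have hek : e ∈ (pvG d).keys := (mem_keys_pvG d hk e).mpr ⟨x, hx, he⟩
    have hg := h (PySem.List.sorted ((pvG d).getD e []) (fun y => y))
      (by rw [PySem.Set.mem_ofList, List.mem_map]
          exact ⟨(pvG d).getD e [], (hvals _).mpr ⟨e, hek, rfl⟩, rfl⟩)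
    rw [PySem.Set.mem_ofList, List.mem_flatMap] at hg
    by_contra hey
    apply hg
    refine ⟨x, ?_, ?_⟩
    · rw [PySem.List.mem_sorted]
      exact (mem_pvG d hk x e).mpr ⟨hx, he⟩
    · rw [List.mem_map]
      refine ⟨y, ?_, rfl⟩
      rw [PySem.Set.mem_diff]
      refine ⟨hy, fun hmem => hey ?_⟩
      rw [PySem.List.mem_sorted] at hmem
      exact ((mem_pvG d hk y e).mp hmem).2
  · intro h g hg hmem
    rw [PySem.Set.mem_ofList, List.mem_map] at hg
    obtain ⟨v, hv, rfl⟩ := hg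
    obtain ⟨e, hek, rfl⟩ := (hvals v).mp hv
    rw [PySem.Set.mem_ofList, List.mem_flatMap] at hmem
    obtain ⟨s, hs, hpair⟩ := hmem
    rw [List.mem_map] at hpair
    obtain ⟨m, hm, hme⟩ := hpair
    rw [Prod.mk.injEq] at hme
    obtain ⟨h1, h2⟩ := hme
    rw [h1] at hs
    rw [h2] at hm
    rw [PySem.Set.mem_diff] at hm
    rw [PySem.List.mem_sorted] at hs
    have hex : e ∈ d.getD x [] := ((mem_pvG d hk x e).mp hs).2
    exact hm.2 (by rw [PySem.List.mem_sorted]; exact (mem_pvG d hk y e).mpr ⟨hy, h e hex⟩)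



theorem sublist_pair_iff_idxOf (l : List String) (hl : l.Nodup) (x y : String)
    (hx : x ∈ l) (hy : y ∈ l) :
    [x, y].Sublist l ↔ l.idxOf x < l.idxOf y := by
  induction l with
  | nil => cases hx
  | cons a t ih =>
    obtain ⟨hat, hnd⟩ := List.nodup_cons.mp hl
    by_cases hxa : x = a
    · subst hxa
      have h0 : (x :: t).idxOf x = 0 := by simp
      by_cases hyx : y = x
      · subst hyx
        rw [h0]
        simp only [Nat.lt_irrefl, iff_false]
        intro h
        cases h with
        | cons _ h' => exact hat (h'.subset (List.mem_cons_self ..))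
        | cons₂ _ h' => exact hat (List.singleton_sublist.mp h')
      · have hyt : y ∈ t := (List.mem_cons.mp hy).resolve_left hyx
        have h1 : (x :: t).idxOf y = t.idxOf y + 1 := by
          rw [List.idxOf_cons, beq_eq_false_iff_ne.mpr (fun h => hyx h.symm)]
          rfl
        rw [h0, h1]
        simp only [Nat.succ_pos, iff_true]
        exact List.cons_sublist_cons.mpr (List.singleton_sublist.mpr hyt)
    · have hxt : x ∈ t := (List.mem_cons.mp hx).resolve_left hxa
      by_cases hya : y = a
      · subst hya
        have h0 : (y :: t).idxOf y = 0 := by simp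
        rw [h0]
        simp only [Nat.not_lt_zero, iff_false]
        intro h
        cases h with
        | cons _ h' => exact hat (h'.subset (by simp))
        | cons₂ _ h' => exact hxa rfl
      · have hyt : y ∈ t := (List.mem_cons.mp hy).resolve_left hya
        have hsub : [x, y].Sublist (a :: t) ↔ [x, y].Sublist t := by
          constructor
          · intro h
            cases h with
            | cons _ h' => exact h'
            | cons₂ _ h' => exact absurd rfl hxa
          · exact fun h => h.cons a
        rw [hsub, ih hnd hxt hyt, List.idxOf_cons, List.idxOf_cons,
          beq_eq_false_iff_ne.mpr (fun h => hxa h.symm),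
          beq_eq_false_iff_ne.mpr (fun h => hya h.symm)]
        simp

theorem mem_supers (d : PySem.Dict String (List Int)) (hk : d.keys.Nodup) (x y : String) :
    y ∈ pvSupers d x ↔ y ∈ d.keys ∧ ∀ e ∈ d.getD x [], e ∈ d.getD y [] := by
  unfold pvSupers
  cases hEx : d.getD x [] with
  | nil =>
    simp only [PySem.Set.mem_ofList, pvOrder, PySem.List.mem_sorted]
    simp
  | cons e rest =>
    rw [mem_foldl_inter rest (fun e' => (pvG d).getD e' []) _ y]
    simp only [PySem.Set.mem_ofList, mem_pvG d hk, List.mem_cons]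
    constructor
    · rintro ⟨⟨hyk, hey⟩, hrest⟩
      refine ⟨hyk, ?_⟩
      rintro e' (rfl | he')
      · exact hey
      · exact (hrest e' he').2
    · rintro ⟨hyk, hall⟩
      exact ⟨⟨hyk, hall e (Or.inl rfl)⟩, fun e' he' => ⟨hyk, hall e' (Or.inr he')⟩⟩

theorem pvRank_getD (d : PySem.Dict String (List Int)) (y : String) (hord : (pvOrder d).Nodup)
    (hy : y ∈ pvOrder d) : (pvRank d).getD y 0 = ((pvOrder d).idxOf y : Int) := by
  unfold pvRank
  rw [rank_getD (pvOrder d) hord 0 PySem.Dict.empty y hy]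
  ring

theorem mem_pvFinal (d : PySem.Dict String (List Int)) (hk : d.keys.Nodup) (x y : String) :
    (x, y) ∈ pvFinal d ↔
      [x, y].Sublist (pvOrder d) ∧ ∀ e ∈ d.getD x [], e ∈ d.getD y [] := by
  unfold pvFinal
  rw [mem_foldl_diff, mem_cand]
  constructor
  · rintro ⟨hsub, hall⟩
    have hx : x ∈ d.keys := by
      have := hsub.subset (List.mem_cons_self ..)
      rwa [pvOrder, PySem.List.mem_sorted] at this
    have hy : y ∈ d.keys := by
      have := hsub.subset (show y ∈ [x, y] by simp)
      rwa [pvOrder, PySem.List.mem_sorted] at this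
    exact ⟨hsub, (survival d hk x y hx hy).mp hall⟩
  · rintro ⟨hsub, hss⟩
    have hx : x ∈ d.keys := by
      have := hsub.subset (List.mem_cons_self ..)
      rwa [pvOrder, PySem.List.mem_sorted] at this
    have hy : y ∈ d.keys := by
      have := hsub.subset (show y ∈ [x, y] by simp)
      rwa [pvOrder, PySem.List.mem_sorted] at this
    exact ⟨hsub, (survival d hk x y hx hy).mpr hss⟩

theorem A_eq (l : List (String × List Int)) :
    find_contained l = PySem.List.sorted
      (PySem.Set.ofList ((pvFinal (pvDict l)).map (fun p => p.1))) (fun y => y) := by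
  simp only [find_contained]
  rw [PySem.List.foldl_prod_mk
    (f := fun (s1 : PySem.Set Int) (pr : String × List Int) => PySem.Set.update s1 pr.2)
    (g := fun (s2 : PySem.Dict Int (PySem.Set String)) pr =>
      pr.2.foldl (fun acc elem => acc.modify elem [] (fun s => PySem.Set.add s pr.1)) s2)]
  rfl

theorem B_eq (l : List (String × List Int)) :
    find_contained_alt l = PySem.List.sorted
      ((pvDict l).keys.filter (pvP (pvDict l))) (fun y => y) := by
  simp only [find_contained_alt]
  rw [PySem.List.foldl_append_if_eq_filter]
  rfl

theorem pv_main (l : List (String × List Int)) : find_contained l = find_contained_alt l := by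
  have hk := pvDict_keys_nodup l
  rw [A_eq, B_eq]
  set d := pvDict l with hd
  have hord : (pvOrder d).Nodup := by
    unfold pvOrder
    exact (PySem.List.sorted_perm d.keys _ false).nodup_iff.mpr hk
  have hmemord : ∀ z, z ∈ pvOrder d ↔ z ∈ d.keys := by
    intro z
    rw [pvOrder, PySem.List.mem_sorted]
  apply PySem.List.sorted_eq_sorted_of_perm _ _ _ (fun a b h => h)
  rw [List.perm_ext_iff_of_nodup (PySem.Set.nodup_ofList _) (hk.filter _)]
  intro x
  rw [PySem.Set.mem_ofList, List.mem_map, List.mem_filter]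
  constructor
  · rintro ⟨⟨px, py⟩, hp, rfl⟩
    obtain ⟨hsub, hss⟩ := (mem_pvFinal d hk px py).mp hp
    have hxo : px ∈ pvOrder d := hsub.subset (List.mem_cons_self ..)
    have hyo : py ∈ pvOrder d := hsub.subset (show py ∈ [px, py] by simp)
    refine ⟨(hmemord px).mp hxo, ?_⟩
    rw [pvP, List.any_eq_true]
    refine ⟨py, ?_, ?_⟩
    · exact (mem_supers d hk px py).mpr ⟨(hmemord py).mp hyo, hss⟩
    · rw [pvRank_getD d px hord hxo, pvRank_getD d py hord hyo]
      have := (sublist_pair_iff_idxOf (pvOrder d) hord px py hxo hyo).mp hsub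
      simp only [decide_eq_true_eq]
      exact_mod_cast this
  · rintro ⟨hxk, hpx⟩
    rw [pvP, List.any_eq_true] at hpx
    obtain ⟨y, hys, hlt⟩ := hpx
    obtain ⟨hyk, hss⟩ := (mem_supers d hk x y).mp hys
    have hxo : x ∈ pvOrder d := (hmemord x).mpr hxk
    have hyo : y ∈ pvOrder d := (hmemord y).mpr hyk
    rw [pvRank_getD d x hord hxo, pvRank_getD d y hord hyo, decide_eq_true_eq] at hlt
    have hidx : (pvOrder d).idxOf x < (pvOrder d).idxOf y := by exact_mod_cast hlt
    refine ⟨(x, y), ?_, rfl⟩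
    exact (mem_pvFinal d hk x y).mpr
      ⟨(sublist_pair_iff_idxOf (pvOrder d) hord x y hxo hyo).mpr hidx, hss⟩

-- ===== VERDICT (by name: the statement is the Claim_ definition above) =====
theorem find_contained_spec : Claim_equal_find_contained := by
  intro l _
  exact pv_main l
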